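-- pv_equiv track=rewrite | github.com/bohodays/Algorithm_problem_solving | 프로그래머스/1/138477. 명예의 전당 （1）/명예의 전당 （1）.py | solution
-- ===== SOURCE A (Python) =====
-- def solution(k, score):
--     result = []
--     answer = []
--
--     for item in score:
--         if len(answer) == 0:
--             result.append(item)
--         else:
--             if len(answer) < k:
--                 result.append(item)
--             else:
--                 if result[0] < item:
--                     result[0] = item
--         result.sort()
--         answer.append(result[0])
--
--     return answer
-- ===== SOURCE B (Python) =====
-- def solution(k, score):
--     # Stateless re-implementation: after day i the hall of fame holds the
--     # max(1, min(k, i + 1)) best scores so far (never fewer than one), and the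
--     # day's published score is the least of them, i.e. that-ranked largest
--     # element of the sorted prefix.
--     answer = []
--     for i in range(len(score)):
--         answer.append(sorted(score[:i + 1])[-max(1, min(k, i + 1))])
--     return answer
-- ===== Notes on version B (the rewrite author's own statement) =====
-- stated objective: simpler
-- what changed: B maintains no running bounded top-k list across days: each day it recomputes the answer from scratch by sorting the whole prefix score[:i+1] and indexing its max(1, min(k, i+1))-th largest element (the hall's size, never below one), replacing A's incremental append/head-replace/re-sort state machine with a stateless one-line loop.
import Mathlib
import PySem

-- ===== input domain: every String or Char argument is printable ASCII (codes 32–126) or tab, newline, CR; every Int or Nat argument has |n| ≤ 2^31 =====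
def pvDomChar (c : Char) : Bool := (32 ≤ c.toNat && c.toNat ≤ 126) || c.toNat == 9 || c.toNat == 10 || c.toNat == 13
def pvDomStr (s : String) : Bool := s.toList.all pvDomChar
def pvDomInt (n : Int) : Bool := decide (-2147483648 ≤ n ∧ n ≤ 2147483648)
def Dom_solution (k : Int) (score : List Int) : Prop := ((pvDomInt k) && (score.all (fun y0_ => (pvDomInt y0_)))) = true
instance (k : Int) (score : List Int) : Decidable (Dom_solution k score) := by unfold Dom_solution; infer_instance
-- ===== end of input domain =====

-- B replaces A's maintained top-k list by a stateless per-day recomputation: the max(1, min(k, i+1))-th largest of the sorted prefix (the hall's size, never below one); objective: simpler.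


-- ===== PORT A =====
def solutionStep (k : Int) (st : List Int × List Int) (item : Int) : List Int × List Int :=
  let result := st.1
  let answer := st.2
  let result :=
    if answer.length = 0 then result ++ [item]
    else if (answer.length : Int) < k then result ++ [item]
    else match result with
      | [] => []                                         -- unreachable: result is nonempty from the first iteration on
      | r0 :: rt => if r0 < item then item :: rt else r0 :: rt   -- result[0] = item
  let result := PySem.List.sorted result (fun x => x) false      -- result.sort()
  (result, answer ++ [result.headD 0])                           -- answer.append(result[0]); result is nonempty here

def solution (k : Int) (score : List Int) : List Int :=
  (score.foldl (solutionStep k) ([], [])).2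

-- ===== PORT B =====
def solution_alt (k : Int) (score : List Int) : List Int :=
  (List.range score.length).map (fun (i : Nat) =>
    (PySem.List.pyGet?
        (PySem.List.sorted (PySem.List.slice score none (some ((i : Int) + 1))) (fun x => x) false)
        (-(max 1 (min k ((i : Int) + 1))))).getD 0)      -- sorted(score[:i+1])[-max(1, min(k, i+1))]; always in range

-- ===== PRECONDITION & SPEC =====
def Spec_solution (k : Int) (score : List Int) (out : List Int) : Prop := out = solution_alt k score
instance (k : Int) (score : List Int) (out : List Int) : Decidable (Spec_solution k score out) := by unfold Spec_solution; infer_instance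

-- ===== CLAIM (what is proved, stated in full; the proofs are below) =====
def Claim_equal_solution : Prop := ∀ (k : Int) (score : List Int), Dom_solution k score → Spec_solution k score (solution k score)

-- ===== LEMMAS AND PROOFS =====

-- sorted ascending, identity key (the sort both programs use)
def pvS (p : List Int) : List Int := PySem.List.sorted p (fun x => x) false
-- the k largest elements of p in ascending order: A's maintained list after prefix p
def pvR (k : Nat) (p : List Int) : List Int := (pvS p).drop (p.length - k)
-- the expected answers for the days of l after an already-processed prefix p
def pvAnswers (k : Nat) : List Int → List Int → List Int
  | _, [] => []
  | p, x :: t => (pvR k (p ++ [x])).headD 0 :: pvAnswers k (p ++ [x]) t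

-- basic facts about the shared sort
theorem pvS_perm (p : List Int) : (pvS p).Perm p := PySem.List.sorted_perm p _ false
theorem pvS_pairwise (p : List Int) : (pvS p).Pairwise (· ≤ ·) := PySem.List.sorted_pairwise p _
theorem pvS_len (p : List Int) : (pvS p).length = p.length := PySem.List.length_sorted p _ false

-- growing phase: while fewer than k scores have been seen, A keeps the whole sorted prefix
theorem pv_step_grow (k : Nat) (p : List Int) (x : Int) (h : p.length < k) :
    pvS (pvR k p ++ [x]) = pvR k (p ++ [x]) := by
  have h0 : p.length - k = 0 := by omega
  have h1 : (p ++ [x]).length - k = 0 := by simp; omega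
  unfold pvR
  rw [h0, h1, List.drop_zero, List.drop_zero]
  exact PySem.List.sorted_eq_sorted_of_perm _ _ _ (fun a b hab => hab)
    ((pvS_perm p).append_right [x])

-- full phase: replacing the minimum (when beaten) and re-sorting keeps exactly the k largest
theorem pv_step_full (k : Nat) (hk : 1 ≤ k) (p : List Int) (x : Int) (hlen : k ≤ p.length) :
    ∃ r0 rt, pvR k p = r0 :: rt ∧
      pvS (if r0 < x then x :: rt else r0 :: rt) = pvR k (p ++ [x]) := by
  have hslen : (pvS p).length = p.length := pvS_len p
  have hdlen : ((pvS p).drop (p.length - k)).length = k := by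
    rw [List.length_drop, hslen]; omega
  obtain ⟨r0, rt, hrt⟩ : ∃ r0 rt, (pvS p).drop (p.length - k) = r0 :: rt := by
    cases hd : (pvS p).drop (p.length - k) with
    | nil => rw [hd] at hdlen; simp at hdlen; omega
    | cons a b => exact ⟨a, b, rfl⟩
  set u := (pvS p).take (p.length - k) with hu
  have hsplit : pvS p = u ++ r0 :: rt := by rw [hu, ← hrt]; exact (List.take_append_drop _ _).symm
  have hulen : u.length = p.length - k := by
    rw [hu, List.length_take, hslen]; omega
  have hsp : (u ++ r0 :: rt).Perm p := by rw [← hsplit]; exact pvS_perm p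
  have hpw : (u ++ r0 :: rt).Pairwise (· ≤ ·) := by
    rw [← hsplit]; exact pvS_pairwise p
  obtain ⟨hpu, hpr, hcross⟩ := List.pairwise_append.mp hpw
  have hr0 : ∀ b ∈ rt, r0 ≤ b := (List.pairwise_cons.mp hpr).1
  have hlen' : (p ++ [x]).length - k = p.length - k + 1 := by simp; omega
  refine ⟨r0, rt, hrt, ?_⟩
  by_cases hx : r0 < x
  · -- x enters the hall, r0 drops out
    have hperm : ((u ++ [r0]) ++ pvS (x :: rt)).Perm (p ++ [x]) := by
      have p1 : ((u ++ [r0]) ++ pvS (x :: rt)).Perm ((u ++ [r0]) ++ (x :: rt)) :=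
        (pvS_perm (x :: rt)).append_left (u ++ [r0])
      have p2 : ((u ++ [r0]) ++ (x :: rt)).Perm ((u ++ r0 :: rt) ++ [x]) := by
        rw [List.append_assoc, List.append_assoc]
        exact (((List.perm_append_singleton x rt).symm).cons r0).append_left u
      exact (p1.trans p2).trans (hsp.append_right [x])
    have hpw' : ((u ++ [r0]) ++ pvS (x :: rt)).Pairwise (· ≤ ·) := by
      refine List.pairwise_append.mpr ⟨?_, pvS_pairwise (x :: rt), ?_⟩
      · refine List.pairwise_append.mpr ⟨hpu, List.pairwise_singleton _ _, ?_⟩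
        intro a ha b hb
        rw [List.mem_singleton.mp hb]
        exact hcross a ha r0 List.mem_cons_self
      · intro a ha b hb
        have hb' : b ∈ x :: rt := (PySem.List.mem_sorted _ _ _ _).mp hb
        have har0 : a ≤ r0 := by
          rcases List.mem_append.mp ha with h | h
          · exact hcross a h r0 List.mem_cons_self
          · rw [List.mem_singleton.mp h]
        have hr0b : r0 ≤ b := by
          rcases List.mem_cons.mp hb' with h | h
          · exact h ▸ le_of_lt hx
          · exact hr0 b h
        exact le_trans har0 hr0b
    have hc : pvS (p ++ [x]) = (u ++ [r0]) ++ pvS (x :: rt) :=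
      PySem.List.sorted_id_eq_of_perm_of_pairwise _ _ hperm hpw'
    rw [if_pos hx]
    unfold pvR
    rw [hc, hlen', show p.length - k + 1 = (u ++ [r0]).length by simp [hulen], List.drop_left]
  · -- x does not enter: the kept k scores are unchanged
    have hxle : x ≤ r0 := le_of_not_gt hx
    have hperm : (pvS (u ++ [x]) ++ r0 :: rt).Perm (p ++ [x]) := by
      have p1 : (pvS (u ++ [x]) ++ r0 :: rt).Perm ((u ++ [x]) ++ r0 :: rt) :=
        (pvS_perm (u ++ [x])).append_right (r0 :: rt)
      have p2 : ((u ++ [x]) ++ r0 :: rt).Perm ((u ++ r0 :: rt) ++ [x]) := by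
        rw [List.append_assoc, List.append_assoc]
        exact (List.perm_append_comm (l₁ := [x]) (l₂ := r0 :: rt)).append_left u
      exact (p1.trans p2).trans (hsp.append_right [x])
    have hpw' : (pvS (u ++ [x]) ++ r0 :: rt).Pairwise (· ≤ ·) := by
      refine List.pairwise_append.mpr ⟨pvS_pairwise (u ++ [x]), hpr, ?_⟩
      intro a ha b hb
      have ha' : a ∈ u ++ [x] := (PySem.List.mem_sorted _ _ _ _).mp ha
      have har0 : a ≤ r0 := by
        rcases List.mem_append.mp ha' with h | h
        · exact hcross a h r0 List.mem_cons_self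
        · exact (List.mem_singleton.mp h) ▸ hxle
      have hr0b : r0 ≤ b := by
        rcases List.mem_cons.mp hb with h | h
        · exact h ▸ le_refl r0
        · exact hr0 b h
      exact le_trans har0 hr0b
    have hc : pvS (p ++ [x]) = pvS (u ++ [x]) ++ r0 :: rt :=
      PySem.List.sorted_id_eq_of_perm_of_pairwise _ _ hperm hpw'
    rw [if_neg hx]
    have hid : pvS (r0 :: rt) = r0 :: rt := PySem.List.sorted_eq_self_of_pairwise _ _ hpr
    unfold pvR
    rw [hc, hlen', show p.length - k + 1 = (pvS (u ++ [x])).length by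
        rw [pvS_len]; simp [hulen], List.drop_left, hid]

-- the loop invariant: A's fold over the remaining days, started after prefix p
theorem pv_loop (k : Int) (hk : 1 ≤ k) (l : List Int) : ∀ (p ans : List Int), ans.length = p.length →
    l.foldl (solutionStep k) (pvR k.toNat p, ans) =
      (pvR k.toNat (p ++ l), ans ++ pvAnswers k.toNat p l) := by
  induction l with
  | nil => intro p ans _; simp [pvAnswers]
  | cons x t ih =>
    intro p ans h
    have hstep : solutionStep k (pvR k.toNat p, ans) x =
        (pvR k.toNat (p ++ [x]), ans ++ [(pvR k.toNat (p ++ [x])).headD 0]) := by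
      by_cases hp : p.length < k.toNat
      · have hgrow := pv_step_grow k.toNat p x hp
        simp only [pvS] at hgrow
        unfold solutionStep
        by_cases h0 : p.length = 0
        · simp only [h, h0, if_pos]
          rw [hgrow]
        · have hlt : (p.length : Int) < k := by omega
          simp only [h, if_neg h0, if_pos hlt]
          rw [hgrow]
      · have hfull : k.toNat ≤ p.length := le_of_not_gt hp
        obtain ⟨r0, rt, hR, hres⟩ := pv_step_full k.toNat (by omega) p x hfull
        have h0 : ¬ p.length = 0 := by omega
        have h1 : ¬ ((p.length : Int) < k) := by omega
        simp only [pvS] at hres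
        unfold solutionStep
        simp only [h, if_neg h0, if_neg h1, hR]
        rw [hres]
    rw [List.foldl_cons, hstep, ih (p ++ [x]) _ (by simp [h])]
    simp [pvAnswers]

-- pvAnswers written as B writes it: a map over day indices
theorem pv_answers_eq_map (k : Nat) (l : List Int) : ∀ p : List Int, pvAnswers k p l =
    (List.range l.length).map (fun i => (pvR k (p ++ l.take (i + 1))).headD 0) := by
  induction l with
  | nil => intro p; simp [pvAnswers]
  | cons x t ih =>
    intro p
    rw [List.length_cons, List.range_succ_eq_map, List.map_cons, List.map_map]
    show pvAnswers k p (x :: t) = (pvR k (p ++ [x])).headD 0 ::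
      (List.range t.length).map (fun i => (pvR k (p ++ (x :: t).take (i + 1 + 1))).headD 0)
    unfold pvAnswers
    rw [ih (p ++ [x])]
    congr 1
    apply List.map_congr_left
    intro i _
    simp [List.append_assoc]

-- B's per-day expression is the head of the kept-k list
theorem pv_alt_point (k : Int) (hk : 1 ≤ k) (q : List Int) (hq : q ≠ []) :
    (PySem.List.pyGet? (pvS q) (-(max 1 (min k (q.length : Int))))).getD 0 = (pvR k.toNat q).headD 0 := by
  have hn : 1 ≤ q.length := List.length_pos_iff.mpr hq
  set m : Nat := min k.toNat q.length with hm
  have hcast : max 1 (min k (q.length : Int)) = (m : Int) := by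
    rw [hm]; omega
  rw [hcast, PySem.List.pyGet?_neg_natCast (pvS q) m (by omega) (by rw [pvS_len]; omega)]
  rw [pvR, List.headD_eq_head?_getD, List.head?_drop]
  congr 2
  rw [pvS_len]; omega

-- A = B whenever 1 ≤ k
theorem pv_main (k : Int) (score : List Int) (hk : 1 ≤ k) :
    solution k score = solution_alt k score := by
  have hA : solution k score = pvAnswers k.toNat [] score := by
    unfold solution
    have h0 : pvR k.toNat [] = [] := by
      have : pvS [] = [] := rfl
      simp [pvR, this]
    rw [show (([], []) : List Int × List Int) = (pvR k.toNat [], []) by rw [h0],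
      pv_loop k hk score [] [] rfl]
    simp
  have hB : solution_alt k score = pvAnswers k.toNat [] score := by
    unfold solution_alt
    rw [pv_answers_eq_map]
    apply List.map_congr_left
    intro i hi
    have hilt : i < score.length := List.mem_range.mp hi
    have hslice : PySem.List.slice score none (some ((i : Int) + 1)) = score.take (i + 1) := by
      rw [show ((i : Int) + 1) = ((i + 1 : Nat) : Int) by push_cast; ring,
        PySem.List.slice_to_natCast]
    have hlen : (score.take (i + 1)).length = i + 1 := by
      rw [List.length_take]; omega
    have hne : score.take (i + 1) ≠ [] := by
      intro hcon; rw [hcon] at hlen; simp at hlen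
    have := pv_alt_point k hk (score.take (i + 1)) hne
    rw [hslice, show ((i : Int) + 1) = ((score.take (i + 1)).length : Int) by rw [hlen]; push_cast; ring]
    rw [show pvS (score.take (i+1)) = PySem.List.sorted (score.take (i+1)) (fun x => x) false from rfl] at this
    rw [this]
    simp
  rw [hA, hB]

-- for k ≤ 1, A's branch structure is exactly that of k = 1 (the hall never holds fewer than one score)
theorem pv_A_low (k : Int) (hk : k ≤ 1) (score : List Int) : solution k score = solution 1 score := by
  unfold solution
  have h : solutionStep k = solutionStep 1 := by
    funext st item
    unfold solutionStep
    by_cases h0 : st.2.length = 0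
    · simp [h0]
    · have c1 : ¬ ((st.2.length : Int) < k) := by omega
      have c2 : ¬ ((st.2.length : Int) < 1) := by omega
      simp only [if_neg h0, if_neg c1, if_neg c2]
  rw [h]

-- for k ≤ 1, B's clamped hall size max(1, min(k, i+1)) is exactly that of k = 1
theorem pv_B_low (k : Int) (hk : k ≤ 1) (score : List Int) :
    solution_alt k score = solution_alt 1 score := by
  unfold solution_alt
  apply List.map_congr_left
  intro i _
  have h : max 1 (min k ((i : Int) + 1)) = max 1 (min 1 ((i : Int) + 1)) := by omega
  rw [h]

theorem solution_spec : Claim_equal_solution := by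
  intro k score _
  unfold Spec_solution
  by_cases hk : 1 ≤ k
  · exact pv_main k score hk
  · rw [pv_A_low k (by omega) score, pv_B_low k (by omega) score]
    exact pv_main 1 score (by omega)
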